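-- pv_equiv track=rewrite | github.com/NikiBagramov/NIR_ITMO | src/oldrus_anomaly/reporting.py | render_sentence
-- ===== SOURCE A (Python) =====
-- from typing import Dict, List, Optional, Sequence
--
-- def render_sentence(tokens: Sequence[str], highlight_token_idx: Optional[int] = None) -> str:
--     parts: List[str] = []
--     for i, t in enumerate(tokens):
--         if highlight_token_idx is not None and i == highlight_token_idx:
--             parts.append(f"**{t}**")
--         else:
--             parts.append(t)
--     return " ".join(parts)
-- ===== SOURCE B (Python) =====
-- def render_sentence(tokens, highlight_token_idx=None):
--     n = len(tokens)
--     i = highlight_token_idx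
--     if i is None or not (0 <= i < n):
--         return " ".join(tokens)
--     pieces = []
--     if i > 0:
--         pieces.append(" ".join(tokens[:i]))
--     pieces.append(f"**{tokens[i]}**")
--     if i + 1 < n:
--         pieces.append(" ".join(tokens[i+1:]))
--     return " ".join(pieces)
-- ===== Notes on version B (the rewrite author's own statement) =====
-- stated objective: alternative
-- what changed: Instead of A's single enumerate loop with a per-token branch, B splits the list at the highlight index, joins the prefix slice and the suffix slice separately, and concatenates up to three segments (prefix-join, bolded token, suffix-join) with one final join; no highlight or an out-of-range index short-circuits to a plain join.
import Mathlib
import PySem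

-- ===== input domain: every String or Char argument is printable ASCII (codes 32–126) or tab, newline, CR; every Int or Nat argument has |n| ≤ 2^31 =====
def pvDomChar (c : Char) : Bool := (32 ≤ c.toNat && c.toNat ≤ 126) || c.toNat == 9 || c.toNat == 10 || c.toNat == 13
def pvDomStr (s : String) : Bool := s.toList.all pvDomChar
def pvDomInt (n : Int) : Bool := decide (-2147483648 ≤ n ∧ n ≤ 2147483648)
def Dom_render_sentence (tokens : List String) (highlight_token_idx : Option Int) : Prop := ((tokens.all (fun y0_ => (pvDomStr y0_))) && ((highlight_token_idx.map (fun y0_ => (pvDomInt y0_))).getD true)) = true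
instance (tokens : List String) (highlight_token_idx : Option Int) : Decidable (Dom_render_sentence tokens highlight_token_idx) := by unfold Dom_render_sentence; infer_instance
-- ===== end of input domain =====

-- B splits at the highlight index and concatenates up to three independently joined segments
-- (prefix-join, bolded token, suffix-join) instead of A's per-token branch in one loop (alternative decomposition).

-- ===== PORT A =====
-- parts = []; for i, t in enumerate(tokens): append bolded or plain; return " ".join(parts)
def render_sentence (tokens : List String) (highlight_token_idx : Option Int) : String :=
  let parts : List String :=
    (PySem.List.enumerate tokens).foldl
      (fun parts p =>
        if highlight_token_idx ≠ none ∧ some p.1 = highlight_token_idx then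
          parts ++ ["**" ++ p.2 ++ "**"]
        else
          parts ++ [p.2]) []
  PySem.Str.join " " parts

-- ===== PORT B =====
-- early return if no highlight or out-of-range; else join prefix slice, bolded token, suffix slice
def render_sentence_alt (tokens : List String) (highlight_token_idx : Option Int) : String :=
  let n : Int := tokens.length
  match highlight_token_idx with
  | none => PySem.Str.join " " tokens
  | some i =>
    if 0 ≤ i ∧ i < n then
      let pieces : List String :=
        (if 0 < i then [PySem.Str.join " " (PySem.List.slice tokens none (some i))] else [])
        ++ ["**" ++ PySem.List.pyGetD tokens i "" ++ "**"]
        ++ (if i + 1 < n then [PySem.Str.join " " (PySem.List.slice tokens (some (i + 1)) none)] else [])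
      PySem.Str.join " " pieces
    else PySem.Str.join " " tokens

-- ===== PRECONDITION & SPEC =====
def Spec_render_sentence (tokens : List String) (highlight_token_idx : Option Int) (out : String) : Prop := out = render_sentence_alt tokens highlight_token_idx
instance (tokens : List String) (highlight_token_idx : Option Int) (out : String) : Decidable (Spec_render_sentence tokens highlight_token_idx out) := by unfold Spec_render_sentence; infer_instance

-- ===== CLAIM (what is proved, stated in full; the proofs are below) =====
def Claim_equal_render_sentence : Prop := ∀ (tokens : List String) (highlight_token_idx : Option Int), Dom_render_sentence tokens highlight_token_idx → Spec_render_sentence tokens highlight_token_idx (render_sentence tokens highlight_token_idx)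

-- ===== LEMMAS AND PROOFS =====

-- A's append-loop is a map over the enumeration
theorem pv_foldl_append_map {α β : Type} (c : α → Prop) [DecidablePred c] (f g : α → β)
    (l : List α) (acc : List β) :
    l.foldl (fun ps p => if c p then ps ++ [f p] else ps ++ [g p]) acc
      = acc ++ l.map (fun p => if c p then f p else g p) := by
  induction l generalizing acc with
  | nil => simp
  | cons x xs ih => by_cases h : c x <;> simp [List.foldl, ih, h]

-- A's mapped list is tokens with the in-range highlight slot replaced
theorem pv_parts_eq (tokens : List String) (i : Int)
    (h0 : 0 ≤ i) (h1 : i < (tokens.length : Int)) :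
    (PySem.List.enumerate tokens).map
      (fun p => if (some i : Option Int) ≠ none ∧ some p.1 = some i then "**" ++ p.2 ++ "**" else p.2)
    = tokens.set i.toNat ("**" ++ PySem.List.pyGetD tokens i "" ++ "**") := by
  have hlt : i.toNat < tokens.length := by omega
  apply List.ext_getElem
  · simp [PySem.List.length_enumerate]
  · intro k hk hk'
    have hk2 : k < tokens.length := by
      simpa [PySem.List.length_enumerate] using hk
    rw [List.getElem_map, PySem.List.getElem_enumerate]
    rw [List.getElem_set]
    by_cases hki : k = i.toNat
    · subst hki
      have h1' : ((i.toNat : Nat) : Int) = i := by omega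
      simp [h1', PySem.List.pyGetD, PySem.List.pyGet?, PySem.List.pyIdx?, h0, h1, hlt]
    · have hA : ¬ ((k : Int) = i) := by omega
      have hB : ¬ (i.toNat = k) := fun e => hki e.symm
      simp [hA, hB]

-- A's mapped list is tokens itself when no slot is highlighted
theorem pv_parts_id (tokens : List String) (c : Int × String → Prop) [DecidablePred c]
    (h : ∀ p ∈ PySem.List.enumerate tokens, ¬ c p) :
    (PySem.List.enumerate tokens).map
      (fun p => if c p then "**" ++ p.2 ++ "**" else p.2) = tokens := by
  rw [List.map_congr_left (fun p hp => if_neg (h p hp))]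
  exact PySem.List.map_snd_enumerate tokens 0

-- joining a split list with both halves nonempty
theorem pv_join_append (sep : String) (xs ys : List String) (hx : xs ≠ []) (hy : ys ≠ []) :
    PySem.Str.join sep (xs ++ ys) = PySem.Str.join sep xs ++ sep ++ PySem.Str.join sep ys := by
  induction xs with
  | nil => exact absurd rfl hx
  | cons a xs ih =>
    cases xs with
    | nil =>
      cases ys with
      | nil => exact absurd rfl hy
      | cons b ys =>
        apply String.ext
        simp [PySem.Str.toList_join, PySem.Chars.join_singleton, PySem.Chars.join_cons_cons]
    | cons a2 xs2 =>
      have h2 : (a2 :: xs2 : List String) ≠ [] := by simp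
      apply String.ext
      have := congrArg String.toList (ih h2)
      simp only [List.cons_append]
      simp [PySem.Str.toList_join, PySem.Chars.join_cons_cons] at this ⊢
      simp [this]

-- ===== VERDICT (by name: the statement is the Claim_ definition above) =====
theorem render_sentence_spec : Claim_equal_render_sentence := by
  intro tokens hi _
  unfold Spec_render_sentence render_sentence render_sentence_alt
  rw [pv_foldl_append_map (fun p : Int × String => hi ≠ none ∧ some p.1 = hi)
        (fun p => "**" ++ p.2 ++ "**") (fun p => p.2), List.nil_append]
  cases hi with
  | none =>
    simp only
    rw [pv_parts_id tokens _ (by simp)]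
  | some i =>
    by_cases h : 0 ≤ i ∧ i < (tokens.length : Int)
    · simp only [if_pos h]
      rw [pv_parts_eq tokens i h.1 h.2]
      have hklt : i.toNat < tokens.length := by omega
      rw [List.set_eq_take_cons_drop ("**" ++ PySem.List.pyGetD tokens i "" ++ "**") hklt]
      rw [PySem.List.slice_to tokens h.1, PySem.List.slice_from tokens (by omega : (0:Int) ≤ i + 1)]
      have hdrop : (i + 1).toNat = i.toNat + 1 := by omega
      rw [hdrop]
      by_cases hp : 0 < i
      · have hpre : tokens.take i.toNat ≠ [] := by
          intro e
          rcases List.take_eq_nil_iff.mp e with e' | e'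
          · omega
          · subst e'; simp at h; omega
        by_cases hs : i + 1 < (tokens.length : Int)
        · have hsuf : tokens.drop (i.toNat + 1) ≠ [] := by
            intro e; rw [List.drop_eq_nil_iff] at e; omega
          simp only [if_pos hp, if_pos hs]
          rw [show tokens.take i.toNat ++ ("**" ++ PySem.List.pyGetD tokens i "" ++ "**") :: tokens.drop (i.toNat+1)
                = tokens.take i.toNat ++ (["**" ++ PySem.List.pyGetD tokens i "" ++ "**"] ++ tokens.drop (i.toNat+1)) by simp]
          rw [pv_join_append " " _ _ hpre (by simp),
              pv_join_append " " ["**" ++ PySem.List.pyGetD tokens i "" ++ "**"] _ (by simp) hsuf]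
          rw [show ([PySem.Str.join " " (tokens.take i.toNat)] ++ ["**" ++ PySem.List.pyGetD tokens i "" ++ "**"] ++ [PySem.Str.join " " (tokens.drop (i.toNat+1))] : List String)
                = [PySem.Str.join " " (tokens.take i.toNat)] ++ (["**" ++ PySem.List.pyGetD tokens i "" ++ "**"] ++ [PySem.Str.join " " (tokens.drop (i.toNat+1))]) by simp]
          rw [pv_join_append " " _ _ (by simp) (by simp),
              pv_join_append " " ["**" ++ PySem.List.pyGetD tokens i "" ++ "**"] _ (by simp) (by simp)]
          apply String.ext
          simp [PySem.Str.toList_join, PySem.Chars.join_singleton]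
        · have hsuf : tokens.drop (i.toNat + 1) = [] := by
            rw [List.drop_eq_nil_iff]; omega
          simp only [if_pos hp, if_neg hs, hsuf, List.append_nil]
          rw [pv_join_append " " _ _ hpre (by simp),
              pv_join_append " " _ _ (by simp) (by simp)]
          apply String.ext
          simp [PySem.Str.toList_join, PySem.Chars.join_singleton]
      · have hk0 : i.toNat = 0 := by omega
        have htake : tokens.take i.toNat = [] := by simp [hk0]
        by_cases hs : i + 1 < (tokens.length : Int)
        · have hsuf : tokens.drop (i.toNat + 1) ≠ [] := by
            intro e; rw [List.drop_eq_nil_iff] at e; omega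
          simp only [if_neg hp, if_pos hs, htake, List.nil_append]
          rw [show (("**" ++ PySem.List.pyGetD tokens i "" ++ "**") :: tokens.drop (i.toNat+1))
                = ["**" ++ PySem.List.pyGetD tokens i "" ++ "**"] ++ tokens.drop (i.toNat+1) by simp]
          rw [pv_join_append " " ["**" ++ PySem.List.pyGetD tokens i "" ++ "**"] _ (by simp) hsuf,
              pv_join_append " " ["**" ++ PySem.List.pyGetD tokens i "" ++ "**"] [PySem.Str.join " " (tokens.drop (i.toNat+1))] (by simp) (by simp)]
          apply String.ext
          simp [PySem.Str.toList_join, PySem.Chars.join_singleton]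
        · have hsuf : tokens.drop (i.toNat + 1) = [] := by
            rw [List.drop_eq_nil_iff]; omega
          simp only [if_neg hp, if_neg hs, htake, hsuf, List.nil_append, List.append_nil]
    · simp only [if_neg h]
      rw [pv_parts_id tokens _ ?_]
      intro p hp hc
      have hpi : p.1 = i := by simpa using hc.2
      obtain ⟨idx, hidx, hpe⟩ := List.mem_iff_getElem.mp hp
      have hlen : idx < tokens.length := by
        simpa [PySem.List.length_enumerate] using hidx
      have hfst : p.1 = (idx : Int) := by
        rw [← hpe, PySem.List.getElem_enumerate]; simp
      omega
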